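-- pv_equiv track=rewrite | github.com/alex-abrams711/synapse | src/synapse_cli/parsers/schema_generator.py | _normalize_field_mapping
-- ===== SOURCE A (Python) =====
-- from collections import defaultdict
-- from typing import Dict, List, Tuple, Optional
--
-- def _normalize_field_mapping(
--     raw_fields: List[str]
-- ) -> Dict[str, List[str]]:
--     """
--     Create semantic field mapping.
--
--     Args:
--         raw_fields: List of raw field names
--
--     Returns:
--         Dict mapping semantic names to raw field variations
--     """
--     mapping = defaultdict(list)
--
--     for raw_field in raw_fields:
--         raw_lower = raw_field.lower()
--
--         # Determine semantic category
--         if "dev" in raw_lower: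
--             semantic = "dev"
--         elif "qa" in raw_lower or "quality" in raw_lower or "test" in raw_lower:
--             semantic = "qa"
--         elif "user" in raw_lower or "verification" in raw_lower or "uv" in raw_lower:
--             semantic = "user_verification"
--         else:
--             # Create custom semantic field
--             semantic = raw_field.lower().replace(" ", "_").replace("-", "_")
--
--         mapping[semantic].append(raw_field)
--
--     return dict(mapping)
-- ===== SOURCE B (Python) =====
-- def _normalize_field_mapping(raw_fields):
--     """Key-major grouping: classify each field once, collect the distinct
--     semantic keys in first-occurrence order, then build each group by
--     filtering the (field, semantic) pairs per key (no dict accumulation)."""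
--     def classify(raw):
--         low = raw.lower()
--         if "dev" in low:
--             return "dev"
--         if "qa" in low or "quality" in low or "test" in low:
--             return "qa"
--         if "user" in low or "verification" in low or "uv" in low:
--             return "user_verification"
--         return low.replace(" ", "_").replace("-", "_")
--
--     sems = [classify(f) for f in raw_fields]
--     seen = []
--     for s in sems:
--         if s not in seen:
--             seen.append(s)
--     return {s: [f for f, t in zip(raw_fields, sems) if t == s] for s in seen}
-- ===== Notes on version B (the rewrite author's own statement) =====
-- stated objective: alternative
-- what changed: A builds the groups in one pass by appending each field into a defaultdict; B never accumulates a dict: it first computes the distinct semantic keys in first-occurrence order, then constructs each group by re-filtering the entire input list per key (key-major nested passes, O(n*k)).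
import Mathlib
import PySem

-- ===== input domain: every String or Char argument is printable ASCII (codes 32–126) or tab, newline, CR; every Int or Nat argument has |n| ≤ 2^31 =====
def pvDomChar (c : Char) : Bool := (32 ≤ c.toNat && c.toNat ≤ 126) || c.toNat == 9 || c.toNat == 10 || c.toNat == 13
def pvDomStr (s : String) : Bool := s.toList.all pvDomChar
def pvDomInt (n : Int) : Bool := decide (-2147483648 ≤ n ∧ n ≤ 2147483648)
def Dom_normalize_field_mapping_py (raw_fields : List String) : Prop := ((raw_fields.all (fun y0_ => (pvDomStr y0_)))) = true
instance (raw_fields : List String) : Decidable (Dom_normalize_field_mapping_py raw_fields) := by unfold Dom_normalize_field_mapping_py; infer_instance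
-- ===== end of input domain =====

-- B replaces A's single-pass defaultdict accumulation by key-major grouping: collect the distinct
-- semantic keys in first-occurrence order, then build each group by filtering the input per key.

-- ===== PORT A =====
def normalize_field_mapping_py (raw_fields : List String) : List (String × List String) :=
  (raw_fields.foldl (fun mapping raw_field =>
      let raw_lower := PySem.Str.lower raw_field
      let semantic :=
        if PySem.Str.isIn "dev" raw_lower then "dev"
        else if PySem.Str.isIn "qa" raw_lower || PySem.Str.isIn "quality" raw_lower
                || PySem.Str.isIn "test" raw_lower then "qa"
        else if PySem.Str.isIn "user" raw_lower || PySem.Str.isIn "verification" raw_lower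
                || PySem.Str.isIn "uv" raw_lower then "user_verification"
        else PySem.Str.replace (PySem.Str.replace (PySem.Str.lower raw_field) " " "_") "-" "_"
      mapping.modify semantic [] (· ++ [raw_field]))
    PySem.Dict.empty).items

-- ===== PORT B =====
def nfmClassify (raw : String) : String :=
  let low := PySem.Str.lower raw
  if PySem.Str.isIn "dev" low then "dev"
  else if PySem.Str.isIn "qa" low || PySem.Str.isIn "quality" low
          || PySem.Str.isIn "test" low then "qa"
  else if PySem.Str.isIn "user" low || PySem.Str.isIn "verification" low
          || PySem.Str.isIn "uv" low then "user_verification"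
  else PySem.Str.replace (PySem.Str.replace low " " "_") "-" "_"

def normalize_field_mapping_py_alt (raw_fields : List String) : List (String × List String) :=
  let sems := raw_fields.map nfmClassify
  let seen := sems.foldl (fun s t => PySem.Set.add s t) PySem.Set.empty
  seen.map (fun s => (s, ((raw_fields.zip sems).filter (fun p => p.2 == s)).map (·.1)))

-- ===== PRECONDITION & SPEC =====
def Spec_normalize_field_mapping_py (raw_fields : List String) (out : List (String × List String)) : Prop := out = normalize_field_mapping_py_alt raw_fields
instance (raw_fields : List String) (out : List (String × List String)) : Decidable (Spec_normalize_field_mapping_py raw_fields out) := by unfold Spec_normalize_field_mapping_py; infer_instance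

-- ===== CLAIM (what is proved, stated in full; the proofs are below) =====
def Claim_equal_normalize_field_mapping_py : Prop := ∀ (raw_fields : List String), Dom_normalize_field_mapping_py raw_fields → Spec_normalize_field_mapping_py raw_fields (normalize_field_mapping_py raw_fields)

-- ===== LEMMAS AND PROOFS =====

-- A's group-by-append fold, characterised: its items are the distinct keys in first-occurrence
-- order, each paired with the filtered input.
lemma nfm_items_group (c : String → String) (L : List String) :
    (L.foldl (fun d r => d.modify (c r) [] (· ++ [r])) PySem.Dict.empty).items
      = (PySem.Set.ofList (L.map c)).map
          (fun s => (s, L.filter (fun r => c r == s))) := by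
  have hfold : L.foldl (fun d r => d.modify (c r) [] (· ++ [r])) PySem.Dict.empty
      = (L.map (fun r => (c r, r))).foldl
          (fun d p => d.modify p.1 [] (· ++ [p.2])) PySem.Dict.empty := by
    rw [List.foldl_map]
  have hkeys : (L.foldl (fun d r => d.modify (c r) [] (· ++ [r])) PySem.Dict.empty).keys
      = PySem.Set.ofList (L.map c) := by
    rw [PySem.Dict.keys_foldl_modify_key]
    simp [PySem.Dict.keys_empty, PySem.Set.ofList_eq_foldl, PySem.Set.update]
  have hnd : (L.foldl (fun d r => d.modify (c r) [] (· ++ [r])) PySem.Dict.empty).keys.Nodup := by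
    rw [hkeys]; exact PySem.Set.nodup_ofList _
  rw [PySem.Dict.items_eq_map_keys _ hnd [], hkeys]
  refine List.map_congr_left (fun s _ => ?_)
  rw [hfold, PySem.Dict.getD_foldl_modify_append]
  simp [List.filter_map, Function.comp_def]

lemma nfm_zip_map {α β : Type} (c : α → β) (L : List α) :
    L.zip (L.map c) = L.map (fun r => (r, c r)) := by
  induction L with
  | nil => rfl
  | cons a t ih => simp [ih]

-- B's key-major construction, rewritten over the raw list.
lemma nfm_alt_eq (L : List String) :
    normalize_field_mapping_py_alt L
      = (PySem.Set.ofList (L.map nfmClassify)).map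
          (fun s => (s, L.filter (fun r => nfmClassify r == s))) := by
  show ((L.map nfmClassify).foldl (fun s t => PySem.Set.add s t) PySem.Set.empty).map
      (fun s => (s, ((L.zip (L.map nfmClassify)).filter (fun p => p.2 == s)).map (·.1))) = _
  rw [show (L.map nfmClassify).foldl (fun s t => PySem.Set.add s t) PySem.Set.empty
        = PySem.Set.ofList (L.map nfmClassify) from (PySem.Set.ofList_eq_foldl _).symm]
  refine List.map_congr_left (fun s _ => ?_)
  rw [nfm_zip_map]
  simp [List.filter_map, Function.comp_def]

-- ===== VERDICT (by name: the statement is the Claim_ definition above) =====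
theorem normalize_field_mapping_py_spec : Claim_equal_normalize_field_mapping_py := by
  intro raw_fields _
  show (raw_fields.foldl (fun d r => d.modify (nfmClassify r) [] (· ++ [r])) PySem.Dict.empty).items
      = normalize_field_mapping_py_alt raw_fields
  rw [nfm_items_group nfmClassify raw_fields, nfm_alt_eq]
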